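-- pv_equiv track=rewrite | github.com/pypi-data/pypi-mirror-186 | packages/iseqmetatools/iseqmetatools-0.0.6.tar.gz/iseqmetatools-0.0.6/iseqspreadsheet/spreadsheetutils.py | order_by_parameter
-- ===== SOURCE A (Python) =====
-- from collections import OrderedDict
--
-- def get_workflows(unsorted_keys):
--     return sorted(
--         [
--             key
--             for key in unsorted_keys
--             if not key.startswith("input_")
--             and not key.startswith("output_")
--             and not key.startswith("variant")
--         ]
--     )
--
-- def get_inputs(unsorted_keys):
--     return sorted([key for key in unsorted_keys if key.startswith("input_")])
--
-- def get_variants(unsorted_keys):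
--     return sorted([key for key in unsorted_keys if key.startswith("variant")])
--
-- def get_outputs(unsorted_keys):
--     return sorted([key for key in unsorted_keys if key.startswith("output_")])
--
-- def order_by_parameter(meta_json):
--     sorted_meta = OrderedDict()
--     unsorted_keys = list(meta_json.keys())
--
--     workflows = get_workflows(unsorted_keys)
--     inputs = get_inputs(unsorted_keys)
--     variants = get_variants(unsorted_keys)
--     outputs = get_outputs(unsorted_keys)
--
--     sorted_keys = workflows + inputs + variants + outputs
--     new_len = len(sorted_keys)
--     old_len = len(unsorted_keys)
--
--     if new_len != old_len:
--         raise ValueError(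
--             f"Sorted keys number [{new_len}] does not equal unsorted keys number [{old_len}]"
--         )
--
--     for key in sorted_keys:
--         sorted_meta[key] = meta_json[key]
--
--     return sorted_meta
-- ===== SOURCE B (Python) =====
-- from collections import OrderedDict
--
-- def order_by_parameter(meta_json):
--     def rank(key):
--         if key.startswith("input_"):
--             return 1
--         if key.startswith("variant"):
--             return 2
--         if key.startswith("output_"):
--             return 3
--         return 0
--
--     return OrderedDict(
--         (key, meta_json[key])
--         for key in sorted(meta_json, key=lambda k: (rank(k), k))
--     )
-- ===== Notes on version B (the rewrite author's own statement) =====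
-- stated objective: alternative
-- what changed: instead of partitioning keys into four buckets by prefix and sorting each bucket separately before concatenating, B performs a single sort of all keys under the composite key (category rank, key) and builds the OrderedDict from that; the dead length check disappears
import Mathlib
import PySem

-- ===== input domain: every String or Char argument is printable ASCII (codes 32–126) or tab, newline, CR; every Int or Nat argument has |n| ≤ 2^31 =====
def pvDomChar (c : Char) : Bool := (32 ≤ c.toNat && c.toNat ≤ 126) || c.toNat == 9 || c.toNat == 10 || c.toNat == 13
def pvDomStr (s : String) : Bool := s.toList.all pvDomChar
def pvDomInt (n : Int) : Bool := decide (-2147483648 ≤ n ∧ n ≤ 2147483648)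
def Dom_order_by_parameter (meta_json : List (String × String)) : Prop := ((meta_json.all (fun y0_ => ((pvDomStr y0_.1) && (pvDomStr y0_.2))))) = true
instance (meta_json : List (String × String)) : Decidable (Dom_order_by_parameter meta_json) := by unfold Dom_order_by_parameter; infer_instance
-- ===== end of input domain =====

-- B replaces A's four filter-and-sort passes plus concatenation by ONE sort of all keys under the
-- composite key (category rank, key) — a different algorithm (objective: alternative, not claimed faster).

-- ===== PORT A =====
-- helpers of A (each sorts a filtered copy of the key list)
def get_workflows (unsorted_keys : List String) : List String :=
  PySem.List.sorted (unsorted_keys.filter (fun key =>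
    !(PySem.Str.startswith key "input_") && !(PySem.Str.startswith key "output_")
      && !(PySem.Str.startswith key "variant"))) (fun x => x) false

def get_inputs (unsorted_keys : List String) : List String :=
  PySem.List.sorted (unsorted_keys.filter (fun key => PySem.Str.startswith key "input_")) (fun x => x) false

def get_variants (unsorted_keys : List String) : List String :=
  PySem.List.sorted (unsorted_keys.filter (fun key => PySem.Str.startswith key "variant")) (fun x => x) false

def get_outputs (unsorted_keys : List String) : List String :=
  PySem.List.sorted (unsorted_keys.filter (fun key => PySem.Str.startswith key "output_")) (fun x => x) false

def order_by_parameter (meta_json : List (String × String)) : List (String × String) :=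
  let d : PySem.Dict String String := PySem.Dict.ofList meta_json
  let unsorted_keys := PySem.Dict.keys d
  let workflows := get_workflows unsorted_keys
  let inputs := get_inputs unsorted_keys
  let variants := get_variants unsorted_keys
  let outputs := get_outputs unsorted_keys
  let sorted_keys := workflows ++ inputs ++ variants ++ outputs
  if sorted_keys.length ≠ unsorted_keys.length then
    []  -- unreachable: Python raises ValueError here, but the four buckets always partition the keys
  else
    (sorted_keys.foldl (fun acc key => acc.insert key (d.getD key "")) PySem.Dict.empty).items

-- ===== PORT B =====
-- B's category rank: 1 = inputs, 2 = variants, 3 = outputs, 0 = workflows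
def pvRank (key : String) : Int :=
  if PySem.Str.startswith key "input_" then 1
  else if PySem.Str.startswith key "variant" then 2
  else if PySem.Str.startswith key "output_" then 3
  else 0

def order_by_parameter_alt (meta_json : List (String × String)) : List (String × String) :=
  let d : PySem.Dict String String := PySem.Dict.ofList meta_json
  -- sorted(meta_json, key=lambda k: (rank(k), k))
  let ordered := PySem.List.sorted2 (PySem.Dict.keys d) pvRank (fun k => k) false
  (ordered.foldl (fun acc key => acc.insert key (d.getD key "")) PySem.Dict.empty).items

-- ===== PRECONDITION & SPEC =====
def Spec_order_by_parameter (meta_json : List (String × String)) (out : List (String × String)) : Prop := out = order_by_parameter_alt meta_json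
instance (meta_json : List (String × String)) (out : List (String × String)) : Decidable (Spec_order_by_parameter meta_json out) := by unfold Spec_order_by_parameter; infer_instance

-- ===== CLAIM (what is proved, stated in full; the proofs are below) =====
def Claim_equal_order_by_parameter : Prop := ∀ (meta_json : List (String × String)), Dom_order_by_parameter meta_json → Spec_order_by_parameter meta_json (order_by_parameter meta_json)

-- ===== LEMMAS AND PROOFS =====

-- distinct leading characters: a string cannot start with two of the three prefixes
lemma pv_startswith_excl {l p q : List Char} {a b : Char}
    (h : PySem.Chars.startswith l (a :: p) = true) (hab : b ≠ a) :
    PySem.Chars.startswith l (b :: q) = false := by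
  rw [Bool.eq_false_iff]
  intro h2
  rw [PySem.Chars.startswith_iff] at h h2
  obtain ⟨t1, e1⟩ := h
  obtain ⟨t2, e2⟩ := h2
  rw [← e1] at e2
  simp at e2
  exact hab e2.1

-- the category rank of a member of each bucket
lemma rank_of_input {k : String} (h : PySem.Str.startswith k "input_" = true) : pvRank k = 1 := by
  simp at h
  simp [pvRank, h]

lemma rank_of_variant {k : String} (h : PySem.Str.startswith k "variant" = true) : pvRank k = 2 := by
  simp at h
  have hi : PySem.Chars.startswith k.toList ['i','n','p','u','t','_'] = false :=
    pv_startswith_excl h (by decide)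
  simp [pvRank, h, hi]

lemma rank_of_output {k : String} (h : PySem.Str.startswith k "output_" = true) : pvRank k = 3 := by
  simp at h
  have hi : PySem.Chars.startswith k.toList ['i','n','p','u','t','_'] = false :=
    pv_startswith_excl h (by decide)
  have hv : PySem.Chars.startswith k.toList ['v','a','r','i','a','n','t'] = false :=
    pv_startswith_excl h (by decide)
  simp [pvRank, h, hi, hv]

lemma rank_of_workflow {k : String}
    (h : (!(PySem.Str.startswith k "input_") && !(PySem.Str.startswith k "output_")
      && !(PySem.Str.startswith k "variant")) = true) : pvRank k = 0 := by
  simp at h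
  simp [pvRank, h.1.1, h.1.2, h.2]

-- B's comparator (rank first, then the key itself) is the lexicographic order on Int ×ₗ String
lemma sorted2_rank_eq (xs : List String) :
    PySem.List.sorted2 xs pvRank (fun k => k) false
      = PySem.List.sorted xs (fun k => toLex (pvRank k, k)) false := by
  rw [PySem.List.sorted_eq_foldl_insertBy]
  show xs.foldl (fun acc x => PySem.List.insertBy
      (fun a b => decide (pvRank a < pvRank b) || (!decide (pvRank b < pvRank a) && decide (a < b)))
      x acc) [] = _
  have hb : (fun a b : String => decide (pvRank a < pvRank b)
        || (!decide (pvRank b < pvRank a) && decide (a < b)))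
      = (fun a b : String => decide ((fun k => toLex (pvRank k, k)) a < (fun k => toLex (pvRank k, k)) b)) := by
    funext a b
    rcases lt_trichotomy (pvRank a) (pvRank b) with h | h | h
    · simp [Prod.Lex.toLex_lt_toLex, h]
    · simp [Prod.Lex.toLex_lt_toLex, h]
    · have h1 : ¬ pvRank a < pvRank b := not_lt.mpr (le_of_lt h)
      have h2 : pvRank a ≠ pvRank b := ne_of_gt h
      simp [Prod.Lex.toLex_lt_toLex, h, h1, h2]
  rw [hb]

-- A's four buckets are a permutation (a partition, sorted piecewise) of the key list
lemma buckets_perm (ks : List String) :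
    (get_workflows ks ++ get_inputs ks ++ get_variants ks ++ get_outputs ks).Perm ks := by
  have pw := PySem.List.sorted_perm (ks.filter (fun key =>
    !(PySem.Str.startswith key "input_") && !(PySem.Str.startswith key "output_")
      && !(PySem.Str.startswith key "variant"))) (fun x => x) false
  have pi := PySem.List.sorted_perm (ks.filter (fun key => PySem.Str.startswith key "input_")) (fun x => x) false
  have pv := PySem.List.sorted_perm (ks.filter (fun key => PySem.Str.startswith key "variant")) (fun x => x) false
  have po := PySem.List.sorted_perm (ks.filter (fun key => PySem.Str.startswith key "output_")) (fun x => x) false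
  refine ((((pw.append pi).append pv).append po).trans ?_)
  rw [List.perm_iff_count]
  intro a
  simp only [List.count_append]
  have hcf : ∀ (p : String → Bool), p a = false → List.count a (ks.filter p) = 0 := by
    intro p hp
    refine List.count_eq_zero.mpr (fun hmem => ?_)
    have := (List.mem_filter.mp hmem).2
    rw [hp] at this; exact Bool.false_ne_true this
  have cw := fun h => hcf (fun key =>
    !(PySem.Str.startswith key "input_") && !(PySem.Str.startswith key "output_")
      && !(PySem.Str.startswith key "variant")) h
  have ci := fun h => hcf (fun key => PySem.Str.startswith key "input_") h
  have cv := fun h => hcf (fun key => PySem.Str.startswith key "variant") h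
  have co := fun h => hcf (fun key => PySem.Str.startswith key "output_") h
  cases hi : PySem.Str.startswith a "input_" with
  | true =>
    have hi' := hi; simp at hi'
    have hv : PySem.Chars.startswith a.toList ['v','a','r','i','a','n','t'] = false :=
      pv_startswith_excl hi' (by decide)
    have ho : PySem.Chars.startswith a.toList ['o','u','t','p','u','t','_'] = false :=
      pv_startswith_excl hi' (by decide)
    rw [cw (by simp [hi']), cv (by simp [hv]), co (by simp [ho]),
      List.count_filter (p := fun key => PySem.Str.startswith key "input_") (by simp [hi'])]
    omega
  | false =>
    replace hi : PySem.Chars.startswith a.toList ['i','n','p','u','t','_'] = false := by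
      simpa using hi
    cases hv : PySem.Str.startswith a "variant" with
    | true =>
      have hv' := hv; simp at hv'
      have ho : PySem.Chars.startswith a.toList ['o','u','t','p','u','t','_'] = false :=
        pv_startswith_excl hv' (by decide)
      rw [cw (by simp [hv']), ci (by simp [hi]), co (by simp [ho]),
        List.count_filter (p := fun key => PySem.Str.startswith key "variant") (by simp [hv'])]
      omega
    | false =>
      replace hv : PySem.Chars.startswith a.toList ['v','a','r','i','a','n','t'] = false := by
        simpa using hv
      cases ho : PySem.Str.startswith a "output_" with
      | true =>
        have ho' := ho; simp at ho'
        rw [cw (by simp [ho']), ci (by simp [hi]), cv (by simp [hv]),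
          List.count_filter (p := fun key => PySem.Str.startswith key "output_") (by simp [ho'])]
        omega
      | false =>
        replace ho : PySem.Chars.startswith a.toList ['o','u','t','p','u','t','_'] = false := by
          simpa using ho
        rw [ci (by simp [hi]), cv (by simp [hv]), co (by simp [ho]),
          List.count_filter (p := fun key =>
            !(PySem.Str.startswith key "input_") && !(PySem.Str.startswith key "output_")
              && !(PySem.Str.startswith key "variant")) (by simp [hi, hv, ho])]
        omega

-- every element of a bucket has that bucket's rank
lemma rank_mem_workflows {ks : List String} {a : String} (h : a ∈ get_workflows ks) : pvRank a = 0 :=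
  rank_of_workflow (List.mem_filter.mp ((PySem.List.mem_sorted _ _ _ _).mp h)).2

lemma rank_mem_inputs {ks : List String} {a : String} (h : a ∈ get_inputs ks) : pvRank a = 1 :=
  rank_of_input (List.mem_filter.mp ((PySem.List.mem_sorted _ _ _ _).mp h)).2

lemma rank_mem_variants {ks : List String} {a : String} (h : a ∈ get_variants ks) : pvRank a = 2 :=
  rank_of_variant (List.mem_filter.mp ((PySem.List.mem_sorted _ _ _ _).mp h)).2

lemma rank_mem_outputs {ks : List String} {a : String} (h : a ∈ get_outputs ks) : pvRank a = 3 :=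
  rank_of_output (List.mem_filter.mp ((PySem.List.mem_sorted _ _ _ _).mp h)).2

-- a sorted bucket is ≤-pairwise under the composite key (ranks are constant on a bucket)
lemma bucket_pairwise_le {l : List String} {r : Int} (hrank : ∀ a ∈ l, pvRank a = r)
    (hle : l.Pairwise (fun a b : String => a ≤ b)) :
    l.Pairwise (fun a b : String => toLex (pvRank a, a) ≤ toLex (pvRank b, b)) := by
  refine List.Pairwise.imp_of_mem (fun {a b} ha hb hab => ?_) hle
  rw [Prod.Lex.toLex_le_toLex]
  exact Or.inr ⟨by rw [hrank a ha, hrank b hb], hab⟩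

-- the concatenation of the four sorted buckets IS the single composite-key sort
lemma cat_eq_sorted (ks : List String) (hnd : ks.Nodup) :
    PySem.List.sorted ks (fun k => toLex (pvRank k, k)) false
      = get_workflows ks ++ get_inputs ks ++ get_variants ks ++ get_outputs ks := by
  have hperm : (get_workflows ks ++ get_inputs ks ++ get_variants ks ++ get_outputs ks).Perm ks :=
    buckets_perm ks
  refine PySem.List.sorted_eq_of_perm_of_pairwise_lt ks _ _ hperm ?_
  have hne : (get_workflows ks ++ get_inputs ks ++ get_variants ks ++ get_outputs ks).Pairwise (· ≠ ·) :=
    (hperm.symm.nodup hnd)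
  have hle : (get_workflows ks ++ get_inputs ks ++ get_variants ks ++ get_outputs ks).Pairwise
      (fun a b : String => toLex (pvRank a, a) ≤ toLex (pvRank b, b)) := by
    rw [List.append_assoc, List.append_assoc, List.pairwise_append, List.pairwise_append,
      List.pairwise_append]
    have cross : ∀ {l₁ l₂ : List String} {r₁ r₂ : Int}, r₁ < r₂ →
        (∀ a ∈ l₁, pvRank a = r₁) → (∀ b ∈ l₂, pvRank b = r₂) →
        ∀ a ∈ l₁, ∀ b ∈ l₂, toLex (pvRank a, a) ≤ toLex (pvRank b, b) := by
      intro l₁ l₂ r₁ r₂ hr h1 h2 a ha b hb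
      rw [Prod.Lex.toLex_le_toLex]
      exact Or.inl (by rw [h1 a ha, h2 b hb]; exact hr)
    refine ⟨bucket_pairwise_le (fun a h => rank_mem_workflows h) (PySem.List.sorted_pairwise _ _), ?_, ?_⟩
    · refine ⟨bucket_pairwise_le (fun a h => rank_mem_inputs h) (PySem.List.sorted_pairwise _ _), ?_, ?_⟩
      · refine ⟨bucket_pairwise_le (fun a h => rank_mem_variants h) (PySem.List.sorted_pairwise _ _),
          bucket_pairwise_le (fun a h => rank_mem_outputs h) (PySem.List.sorted_pairwise _ _), ?_⟩
        exact cross (by norm_num) (fun a h => rank_mem_variants h) (fun b h => rank_mem_outputs h)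
      · intro a ha b hb
        rcases List.mem_append.mp hb with hb | hb
        · exact cross (by norm_num) (fun a h => rank_mem_inputs h) (fun b h => rank_mem_variants h) a ha b hb
        · exact cross (by norm_num) (fun a h => rank_mem_inputs h) (fun b h => rank_mem_outputs h) a ha b hb
    · intro a ha b hb
      rcases List.mem_append.mp hb with hb | hb
      · exact cross (by norm_num) (fun a h => rank_mem_workflows h) (fun b h => rank_mem_inputs h) a ha b hb
      rcases List.mem_append.mp hb with hb | hb
      · exact cross (by norm_num) (fun a h => rank_mem_workflows h) (fun b h => rank_mem_variants h) a ha b hb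
      · exact cross (by norm_num) (fun a h => rank_mem_workflows h) (fun b h => rank_mem_outputs h) a ha b hb
  refine List.Pairwise.imp (fun {a b} h => ?_) (hle.and hne)
  refine lt_of_le_of_ne h.1 (fun he => h.2 ?_)
  have hp : (pvRank a, a) = (pvRank b, b) := toLex.injective he
  exact (Prod.ext_iff.mp hp).2

-- ===== VERDICT (by name: the statement is the Claim_ definition above) =====
theorem order_by_parameter_spec : Claim_equal_order_by_parameter := by
  intro meta_json _
  show order_by_parameter meta_json = order_by_parameter_alt meta_json
  simp only [order_by_parameter, order_by_parameter_alt]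
  rw [sorted2_rank_eq, cat_eq_sorted _ (PySem.Dict.nodup_keys_ofList meta_json)]
  rw [if_neg (by
    have h := (buckets_perm ((PySem.Dict.ofList meta_json).keys)).length_eq
    simp only [List.length_append] at h
    simp only [ne_eq, List.length_append, not_not]
    omega)]
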